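-- pv_equiv track=rewrite | github.com/devragj/RecordLib | RecordLib/overflow.py | previous_nonblank_line
-- ===== SOURCE A (Python) =====
-- from typing import List, Tuple
--
-- def previous_nonblank_line(prev: List[str], n=1) -> str:
--     """Return the nth nonblank line fron the end of a list of lines.
--
--     Args:
--         prev: list of lines
--         n: return the nth nonblank line. If n is 1, return the last nonblank line. If n is 2, return the second nonblank line from the end of `prev`. Etc.
--     """
--     counter = 1
--     for ln in reversed(prev):
--         if ln.strip() != "":
--             if n==counter:
--                 return ln
--             else:
--                 counter += 1
--     return ""
-- ===== SOURCE B (Python) =====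
-- def previous_nonblank_line(prev, n=1):
--     """Return the nth nonblank line from the end of a list of lines."""
--     nonblank = [ln for ln in prev if ln.strip() != ""]
--     return nonblank[-n] if 1 <= n <= len(nonblank) else ""
-- ===== Notes on version B (the rewrite author's own statement) =====
-- stated objective: simpler
-- what changed: Replaces the reverse scan with a manual counter and early return by a build-then-index shape: filter the nonblank lines once, then return the nth-from-end by negative indexing under an explicit range guard.
import Mathlib
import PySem

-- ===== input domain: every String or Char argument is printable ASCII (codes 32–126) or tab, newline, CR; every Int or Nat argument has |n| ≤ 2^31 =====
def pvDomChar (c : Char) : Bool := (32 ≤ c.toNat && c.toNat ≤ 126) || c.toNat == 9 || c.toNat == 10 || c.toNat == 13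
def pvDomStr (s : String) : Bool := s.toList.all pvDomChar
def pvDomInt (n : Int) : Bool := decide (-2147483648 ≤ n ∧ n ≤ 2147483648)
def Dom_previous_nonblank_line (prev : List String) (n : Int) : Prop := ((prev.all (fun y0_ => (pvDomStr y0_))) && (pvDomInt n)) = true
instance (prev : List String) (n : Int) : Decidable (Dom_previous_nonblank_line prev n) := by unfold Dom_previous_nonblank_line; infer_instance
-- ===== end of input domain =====

-- B builds the list of nonblank lines once and indexes it from the end; objective: simpler.
-- ===== PORT A =====
-- the 'for ln in reversed(prev)' loop with roving counter, as structural recursion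
def pvAloop (l : List String) (n : Int) (counter : Int) : String :=
  match l with
  | [] => ""
  | ln :: rest =>
    if PySem.Str.strip ln != "" then
      if n == counter then ln else pvAloop rest n (counter + 1)
    else pvAloop rest n counter

def previous_nonblank_line (prev : List String) (n : Int) : String :=
  pvAloop prev.reverse n 1

-- ===== PORT B =====
def previous_nonblank_line_alt (prev : List String) (n : Int) : String :=
  let nonblank := prev.filter (fun ln => PySem.Str.strip ln != "")
  if 1 ≤ n ∧ n ≤ (nonblank.length : Int) then (PySem.List.pyGet? nonblank (-n)).getD "" else ""

-- ===== PRECONDITION & SPEC =====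
def Spec_previous_nonblank_line (prev : List String) (n : Int) (out : String) : Prop := out = previous_nonblank_line_alt prev n
instance (prev : List String) (n : Int) (out : String) : Decidable (Spec_previous_nonblank_line prev n out) := by unfold Spec_previous_nonblank_line; infer_instance

-- ===== CLAIM (what is proved, stated in full; the proofs are below) =====
def Claim_equal_previous_nonblank_line : Prop := ∀ (prev : List String) (n : Int), Dom_previous_nonblank_line prev n → Spec_previous_nonblank_line prev n (previous_nonblank_line prev n)

-- ===== LEMMAS AND PROOFS =====

-- characterisation of A's loop: it returns the (n-c)-th (0-based) nonblank line of l, else ""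
theorem pvAloop_eq (l : List String) (n c : Int) :
    pvAloop l n c =
      (if c ≤ n ∧ n - c < ((l.filter (fun ln => PySem.Str.strip ln != "")).length : Int)
       then ((l.filter (fun ln => PySem.Str.strip ln != ""))[(n - c).toNat]?).getD ""
       else "") := by
  induction l generalizing c with
  | nil => simp [pvAloop]
  | cons ln rest ih =>
    simp only [pvAloop, List.filter_cons]
    by_cases hp : (PySem.Str.strip ln != "") = true
    · simp only [hp, if_true, List.length_cons]
      by_cases he : n = c
      · subst he
        simp
      · have hb : (n == c) = false := by simpa using he
        simp only [hb, Bool.false_eq_true, if_false, ih]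
        by_cases h1 : c + 1 ≤ n ∧ n - (c + 1) < ((rest.filter (fun ln => PySem.Str.strip ln != "")).length : Int)
        · rw [if_pos h1, if_pos (by push_cast; omega)]
          have hpos : (n - c).toNat = (n - (c + 1)).toNat + 1 := by omega
          rw [hpos]
          simp
        · rw [if_neg h1, if_neg (by push_cast; omega)]
      
    · simp only [hp, Bool.false_eq_true, if_false, ih]

-- ===== VERDICT (by name: the statement is the Claim_ definition above) =====
theorem previous_nonblank_line_spec : Claim_equal_previous_nonblank_line := by
  intro prev n _
  unfold Spec_previous_nonblank_line previous_nonblank_line previous_nonblank_line_alt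
  rw [pvAloop_eq]
  have hf : prev.reverse.filter (fun ln => PySem.Str.strip ln != "")
      = (prev.filter (fun ln => PySem.Str.strip ln != "")).reverse := by
    rw [List.filter_reverse]
  rw [hf]
  set g := prev.filter (fun ln => PySem.Str.strip ln != "") with hg
  simp only [List.length_reverse]
  by_cases h : 1 ≤ n ∧ n ≤ (g.length : Int)
  · rw [if_pos (by omega), if_pos h]
    have hlt : (n - 1).toNat < g.length := by omega
    rw [List.getElem?_reverse hlt]
    have hn : -n = -((n.toNat : Int)) := by omega
    rw [hn, PySem.List.pyGet?_neg_natCast g n.toNat (by omega) (by omega)]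
    have : g.length - 1 - (n - 1).toNat = g.length - n.toNat := by omega
    rw [this]
  · rw [if_neg (by omega), if_neg h]
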